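-- pv_equiv track=rewrite | github.com/VojtechBrezina/custom-ssg | src/node.py | detect_list_item
-- ===== SOURCE A (Python) =====
-- def detect_list_item(source: str, pos: int) -> (bool, bool | None):
--     while pos < len(source) and source[pos] == ' ':
--         pos += 1
--
--     if pos >= len(source):
--         return False, None
--
--     if source[pos:].startswith('* ') or source[pos:].startswith('- '):
--         return True, False
--
--     if not source[pos].isdigit():
--         return False, None
--     pos += 1
--
--     while pos < len(source) and source[pos].isdigit():
--         pos += 1
--
--     if pos >= len(source):
--         return False, None
--
--     if source[pos:].startswith('. '):
--         return True, True
--     return False, None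
-- ===== SOURCE B (Python) =====
-- def detect_list_item(source: str, pos: int) -> (bool, bool | None):
--     s = source[pos:].lstrip(' ')
--     if s.startswith('* ') or s.startswith('- '):
--         return True, False
--     digits = len(s) - len(s.lstrip('0123456789'))
--     if digits > 0 and s[digits:digits + 2] == '. ':
--         return True, True
--     return False, None
-- ===== Notes on version B (the rewrite author's own statement) =====
-- stated objective: simpler
-- what changed: A's two index-stepping while-loops over positions are replaced by slice/lstrip/startswith operations on the suffix string: B takes source[pos:], strips leading spaces, tests the bullet prefixes, and measures the digit prefix with lstrip('0123456789') instead of scanning indices.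
-- outside the precondition, e.g. on detect_list_item('2. ', -1): A returns (True, True), B returns (False, None); on detect_list_item('* x ', -1): A returns (True, False), B returns (False, None)
import Mathlib
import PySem

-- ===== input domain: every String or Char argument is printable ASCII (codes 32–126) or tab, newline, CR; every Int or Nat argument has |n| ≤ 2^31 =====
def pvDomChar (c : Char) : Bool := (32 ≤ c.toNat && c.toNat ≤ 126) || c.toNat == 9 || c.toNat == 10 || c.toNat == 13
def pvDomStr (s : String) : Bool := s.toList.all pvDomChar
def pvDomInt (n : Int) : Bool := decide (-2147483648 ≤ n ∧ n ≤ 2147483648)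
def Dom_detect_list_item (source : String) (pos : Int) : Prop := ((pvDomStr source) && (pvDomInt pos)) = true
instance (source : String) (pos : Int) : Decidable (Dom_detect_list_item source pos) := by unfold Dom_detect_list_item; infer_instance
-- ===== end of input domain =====

-- B re-implements A's index-stepping while-loops as slice + lstrip + startswith on the suffix string
-- (objective: simpler); equivalence is claimed for 0 ≤ pos (Pre_), negative positions excluded below.

-- ===== PORT A =====
-- one generic scanner transliterates A's two `while pos < len(source) and <test>(source[pos]): pos += 1` loops
def aScan (p : Char → Bool) (cs : List Char) (pos : Int) : Int :=
  if h : pos < (cs.length : Int) ∧ (PySem.List.pyGet? cs pos).any p = true then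
    aScan p cs (pos + 1)
  else pos
termination_by ((cs.length : Int) + 1 - pos).toNat
decreasing_by omega

def detect_list_item (source : String) (pos : Int) : Bool × Option Bool :=
  let cs := source.toList
  let p1 := aScan (fun c => c == ' ') cs pos                    -- skip spaces
  if (cs.length : Int) ≤ p1 then (false, none)                  -- if pos >= len(source)
  else if PySem.Chars.startswith (PySem.List.slice cs (some p1) none) "* ".toList
       || PySem.Chars.startswith (PySem.List.slice cs (some p1) none) "- ".toList then
    (true, some false)
  else if ! (PySem.List.pyGet? cs p1).any PySem.Chars.isdigit then (false, none)
  else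
    let p2 := aScan PySem.Chars.isdigit cs (p1 + 1)             -- skip digits
    if (cs.length : Int) ≤ p2 then (false, none)
    else if PySem.Chars.startswith (PySem.List.slice cs (some p2) none) ". ".toList then
      (true, some true)
    else (false, none)

-- ===== PORT B =====
-- '0123456789' written as its character list
def pvDigits : List Char := ['0', '1', '2', '3', '4', '5', '6', '7', '8', '9']

def detect_list_item_alt (source : String) (pos : Int) : Bool × Option Bool :=
  -- s = source[pos:].lstrip(' ')   (lstrip(' ') is exactly dropWhile (· == ' '))
  let s := (PySem.List.slice source.toList (some pos) none).dropWhile (fun c => c == ' ')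
  if PySem.Chars.startswith s "* ".toList || PySem.Chars.startswith s "- ".toList then
    (true, some false)
  else
    -- digits = len(s) - len(s.lstrip('0123456789'))
    let digits : Nat := s.length - (s.dropWhile (fun c => pvDigits.contains c)).length
    if 0 < digits ∧ PySem.List.slice s (some (digits : Int)) (some ((digits : Int) + 2)) = ". ".toList then
      (true, some true)
    else (false, none)

-- ===== PRECONDITION & SPEC =====
-- Pre_ excludes negative positions: below -len(source) A raises IndexError, and on
-- -len(source) ≤ pos < 0 A's Python negative-index reading (scanning from the string's end and, if the scan
-- runs past index -1, wrapping back to the string's start) is an accident of indexing no caller would specify;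
-- B's slice-based reading of the same suffix is equally defensible there.
def Pre_detect_list_item (source : String) (pos : Int) : Prop := 0 ≤ pos
instance (source : String) (pos : Int) : Decidable (Pre_detect_list_item source pos) := by unfold Pre_detect_list_item; infer_instance
def pvWitness_detect_list_item : String × Int := ("  * a", 0)

def Spec_detect_list_item (source : String) (pos : Int) (out : Bool × Option Bool) : Prop := out = detect_list_item_alt source pos
instance (source : String) (pos : Int) (out : Bool × Option Bool) : Decidable (Spec_detect_list_item source pos out) := by unfold Spec_detect_list_item; infer_instance

-- ===== CLAIM (what is proved, stated in full; the proofs are below) =====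
def Claim_equal_detect_list_item : Prop := ∀ (source : String) (pos : Int), Dom_detect_list_item source pos → Pre_detect_list_item source pos → Spec_detect_list_item source pos (detect_list_item source pos)

-- ===== LEMMAS AND PROOFS =====

lemma isdigit_eq_contains : ∀ c : Char, PySem.Chars.isdigit c = pvDigits.contains c := by
  intro c
  rw [Bool.eq_iff_iff]
  simp [PySem.Chars.isdigit, pvDigits, Char.le_def, UInt32.le_iff_toNat_le, Char.ext_iff,
    ← UInt32.toNat_inj]
  omega

lemma contains_fun_eq_isdigit : (fun c => pvDigits.contains c) = PySem.Chars.isdigit :=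
  funext fun c => (isdigit_eq_contains c).symm

-- the scanner lands exactly where dropWhile lands
lemma aScan_drop (p : Char → Bool) (cs : List Char) (pos : Int) (h0 : 0 ≤ pos) :
    0 ≤ aScan p cs pos ∧
    cs.drop (aScan p cs pos).toNat = (cs.drop pos.toNat).dropWhile p := by
  rw [aScan]
  by_cases hc : pos < (cs.length : Int) ∧ (PySem.List.pyGet? cs pos).any p = true
  · rw [dif_pos hc]
    obtain ⟨hlt, hany⟩ := hc
    have hn : pos.toNat < cs.length := by omega
    have hget : PySem.List.pyGet? cs pos = some cs[pos.toNat] :=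
      PySem.List.pyGet?_eq_some_getElem cs h0 hlt
    have hp : p cs[pos.toNat] = true := by
      rw [hget] at hany; simpa using hany
    have hdrop : cs.drop pos.toNat = cs[pos.toNat] :: cs.drop (pos.toNat + 1) :=
      List.drop_eq_getElem_cons hn
    have ih := aScan_drop p cs (pos + 1) (by omega)
    refine ⟨ih.1, ?_⟩
    rw [ih.2, show (pos + 1).toNat = pos.toNat + 1 from by omega, hdrop,
      List.dropWhile_cons_of_pos hp]
  · rw [dif_neg hc]
    refine ⟨h0, ?_⟩
    by_cases hlt : pos < (cs.length : Int)
    · have hn : pos.toNat < cs.length := by omega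
      have hget : PySem.List.pyGet? cs pos = some cs[pos.toNat] :=
        PySem.List.pyGet?_eq_some_getElem cs h0 hlt
      have hp : p cs[pos.toNat] = false := by
        cases hpv : p cs[pos.toNat]
        · rfl
        · exact absurd ⟨hlt, by rw [hget]; simp [hpv]⟩ hc
      have hdrop : cs.drop pos.toNat = cs[pos.toNat] :: cs.drop (pos.toNat + 1) :=
        List.drop_eq_getElem_cons hn
      rw [hdrop, List.dropWhile_cons_of_neg (by simp [hp])]
    · have : cs.drop pos.toNat = [] := by
        rw [List.drop_eq_nil_iff]; omega
      simp [this]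
termination_by ((cs.length : Int) + 1 - pos).toNat
decreasing_by omega

lemma detect_eq (source : String) (pos : Int) (h0 : 0 ≤ pos) :
    detect_list_item source pos = detect_list_item_alt source pos := by
  simp only [detect_list_item, detect_list_item_alt]
  set cs := source.toList with hcs
  obtain ⟨h1nn, h1drop⟩ := aScan_drop (fun c => c == ' ') cs pos h0
  set p1 := aScan (fun c => c == ' ') cs pos with hp1
  rw [PySem.List.slice_from cs h0, ← h1drop]
  set s := cs.drop p1.toNat with hs
  by_cases hend : (cs.length : Int) ≤ p1
  · -- past the end: s = [], both return (False, None)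
    have hsnil : s = [] := by rw [hs, List.drop_eq_nil_iff]; omega
    rw [if_pos hend, hsnil]
    simp [PySem.Chars.startswith]
  · rw [if_neg hend]
    have hslice : PySem.List.slice cs (some p1) none = s := by
      rw [PySem.List.slice_from cs h1nn]
    rw [hslice]
    have hsne : s ≠ [] := by
      rw [hs, Ne, List.drop_eq_nil_iff]; omega
    obtain ⟨c, t, hct⟩ := List.exists_cons_of_ne_nil hsne
    by_cases hbul : (PySem.Chars.startswith s "* ".toList || PySem.Chars.startswith s "- ".toList) = true
    · rw [if_pos hbul, if_pos hbul]
    · rw [if_neg hbul, if_neg hbul]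
      have hget : PySem.List.pyGet? cs p1 = some c := by
        have hn : p1.toNat < cs.length := by omega
        rw [PySem.List.pyGet?_eq_some_getElem cs h1nn (by omega)]
        have : cs[p1.toNat] :: cs.drop (p1.toNat + 1) = c :: t := by
          rw [← List.drop_eq_getElem_cons hn, ← hs, hct]
        simpa using congrArg some (List.cons_eq_cons.mp this).1
      rw [hget, contains_fun_eq_isdigit]
      by_cases hdig : PySem.Chars.isdigit c = true
      · -- digit case
        have ht : cs.drop (p1.toNat + 1) = t := by
          have hn : p1.toNat < cs.length := by omega
          have := List.drop_eq_getElem_cons hn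
          rw [← hs, hct] at this
          exact (List.cons_eq_cons.mp this).2.symm
        obtain ⟨h2nn, h2drop⟩ := aScan_drop PySem.Chars.isdigit cs (p1 + 1) (by omega)
        set p2 := aScan PySem.Chars.isdigit cs (p1 + 1) with hp2
        have h2 : cs.drop p2.toNat = t.dropWhile PySem.Chars.isdigit := by
          rw [h2drop]
          congr 1
          rw [show (p1 + 1).toNat = p1.toNat + 1 by omega, ht]
        set u := t.dropWhile PySem.Chars.isdigit with hu
        -- B's arithmetic: digits is the length of the digit prefix, s.drop digits = u
        have hsdw : s.dropWhile PySem.Chars.isdigit = u := by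
          rw [hct, List.dropWhile_cons_of_pos hdig]
        have hsplit : s.takeWhile PySem.Chars.isdigit ++ u = s := by
          rw [← hsdw]; exact List.takeWhile_append_dropWhile
        have hdigits : s.length - u.length = (s.takeWhile PySem.Chars.isdigit).length := by
          have := congrArg List.length hsplit
          simp at this
          omega
        have hdiglen : s.drop (s.length - u.length) = u := by
          rw [hdigits]
          nth_rewrite 2 [← hsplit]
          exact List.drop_left
        have hpos : 0 < s.length - u.length := by
          have hle : u.length ≤ t.length := List.length_dropWhile_le _ _
          rw [hct]
          simp only [List.length_cons]
          omega
        rw [hsdw]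
        have hBslice : PySem.List.slice s (some ((s.length - u.length : Nat) : Int))
            (some (((s.length - u.length : Nat) : Int) + 2)) = u.take 2 := by
          rw [show (((s.length - u.length : Nat) : Int) + 2) = (((s.length - u.length) + 2 : Nat) : Int) by push_cast; ring]
          rw [PySem.List.slice_natCast]
          rw [show (s.length - u.length + 2) - (s.length - u.length) = 2 by omega, hdiglen]
        rw [if_neg (by simp [hdig])]
        by_cases hu2 : u.take 2 = ". ".toList
        · -- ". " follows the digits: both return (True, True)
          have hune : u ≠ [] := by
            intro hnil; rw [hnil] at hu2; exact absurd hu2 (by decide)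
          have hp2lt : ¬ (cs.length : Int) ≤ p2 := by
            intro hge
            have : cs.drop p2.toNat = [] := by rw [List.drop_eq_nil_iff]; omega
            rw [h2] at this; exact hune this
          rw [if_neg hp2lt, PySem.List.slice_from cs h2nn, h2]
          have hsw : PySem.Chars.startswith u ". ".toList = true := by
            rw [PySem.Chars.startswith_iff, ← hu2]
            exact List.take_prefix 2 u
          rw [if_pos hsw, if_pos ⟨hpos, hBslice.trans hu2⟩]
        · -- no ". ": both return (False, None)
          by_cases hp2end : (cs.length : Int) ≤ p2
          · rw [if_pos hp2end, if_neg (by rw [hBslice]; exact fun h => hu2 h.2)]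
          · rw [if_neg hp2end, PySem.List.slice_from cs h2nn, h2]
            have hsw : PySem.Chars.startswith u ". ".toList = false := by
              rw [Bool.eq_false_iff, Ne, PySem.Chars.startswith_iff]
              intro hpre
              exact hu2 ((List.prefix_iff_eq_take.mp hpre).symm)
            rw [if_neg (by simpa using hsw), if_neg (by rw [hBslice]; exact fun h => hu2 h.2)]
      · -- head is not a digit: both return (False, None)
        have hdigf : PySem.Chars.isdigit c = false := by
          exact Bool.eq_false_iff.mpr hdig
        have hsdw : s.dropWhile PySem.Chars.isdigit = s := by
          rw [hct, List.dropWhile_cons_of_neg (by simp [hdigf]), ← hct]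
        rw [hsdw]
        simp [hdigf]

-- ===== VERDICT (by name: the statement is the Claim_ definition above) =====
theorem detect_list_item_spec : Claim_equal_detect_list_item := by
  intro source pos _ hpre
  unfold Spec_detect_list_item
  exact detect_eq source pos hpre
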